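-- pv_equiv track=rewrite | github.com/jcolinpatrick/kryptos | scripts/e_route_definitive.py | gen_serpentine
-- ===== SOURCE A (Python) =====
-- def read_order_to_perm(grid, nrows, ncols, cell_order):
--     """Convert a reading order to a permutation (output[i] = input[perm[i]])."""
--     perm = []
--     for r, c in cell_order:
--         if 0 <= r < nrows and 0 <= c < ncols:
--             val = grid[r][c]
--             if val >= 0:
--                 perm.append(val)
--     return perm
--
-- def gen_serpentine(grid, nrows, width, reverse_start=False):
--     """Boustrophedon: row-by-row, alternating L→R/R→L."""
--     order = []
--     for r in range(nrows):
--         even = (r % 2 == 0) if not reverse_start else (r % 2 == 1)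
--         if even:
--             for c in range(width): order.append((r, c))
--         else:
--             for c in range(width - 1, -1, -1): order.append((r, c))
--     return read_order_to_perm(grid, nrows, width, order)
-- ===== SOURCE B (Python) =====
-- def gen_serpentine(grid, nrows, width, reverse_start=False):
--     """Boustrophedon via whole-row slicing: take each row's prefix as a list,
--     reverse it on alternate rows, filter non-negatives — no per-cell indexing."""
--     out = []
--     flip = 1 if reverse_start else 0
--     for r, row in enumerate(grid[:max(nrows, 0)]):
--         seg = row[:max(width, 0)]
--         if (r + flip) % 2:
--             seg = seg[::-1]
--         out.extend(v for v in seg if v >= 0)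
--     return out
-- ===== Notes on version B (the rewrite author's own statement) =====
-- stated objective: simpler
-- what changed: B drops A's coordinate machinery entirely: instead of materializing an (r,c) table and rescanning it cell-by-cell with bounds checks and per-cell grid[r][c] indexing, B works on whole rows as values - slice each row's prefix, reverse it on alternate rows, filter the non-negatives - with no index arithmetic at all.
import Mathlib
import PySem

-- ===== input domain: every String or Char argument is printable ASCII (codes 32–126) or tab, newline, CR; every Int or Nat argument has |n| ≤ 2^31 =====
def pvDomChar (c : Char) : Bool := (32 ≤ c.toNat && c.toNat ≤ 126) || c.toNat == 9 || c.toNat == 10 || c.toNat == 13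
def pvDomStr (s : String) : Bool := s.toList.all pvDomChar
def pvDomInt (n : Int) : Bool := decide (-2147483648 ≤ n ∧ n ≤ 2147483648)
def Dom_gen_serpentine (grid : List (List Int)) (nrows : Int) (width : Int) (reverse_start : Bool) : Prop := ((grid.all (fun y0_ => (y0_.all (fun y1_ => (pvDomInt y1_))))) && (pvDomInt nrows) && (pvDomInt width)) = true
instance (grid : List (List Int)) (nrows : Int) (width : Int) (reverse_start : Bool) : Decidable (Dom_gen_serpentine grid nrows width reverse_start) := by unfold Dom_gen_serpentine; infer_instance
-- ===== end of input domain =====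

-- B replaces A's coordinate-table-then-rescan with whole-row slicing: each row's prefix is
-- taken as a list, reversed on alternate rows, and filtered (simpler decomposition; same cost).


-- ===== PORT A =====
-- grid[r][c] is ported as pyGetD; inside Pre_ every access is in range, so this is exact.
def read_order_to_perm (grid : List (List Int)) (nrows : Int) (ncols : Int) (cell_order : List (Int × Int)) : List Int :=
  cell_order.foldl (fun perm rc =>
    if 0 ≤ rc.1 ∧ rc.1 < nrows ∧ 0 ≤ rc.2 ∧ rc.2 < ncols then
      let val := PySem.List.pyGetD (PySem.List.pyGetD grid rc.1 []) rc.2 0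
      if 0 ≤ val then perm ++ [val] else perm
    else perm) []

def gen_serpentine (grid : List (List Int)) (nrows : Int) (width : Int) (reverse_start : Bool) : List Int :=
  let order := (PySem.List.pyRange 0 nrows 1).foldl (fun order r =>
    let even := if !reverse_start then PySem.Int.mod r 2 == 0 else PySem.Int.mod r 2 == 1
    if even then
      (PySem.List.pyRange 0 width 1).foldl (fun o c => o ++ [(r, c)]) order
    else
      (PySem.List.pyRange (width - 1) (-1) (-1)).foldl (fun o c => o ++ [(r, c)]) order) []
  read_order_to_perm grid nrows width order

-- ===== PORT B =====
-- row prefixes via slicing; grid[:max(nrows,0)] is slice, seg[::-1] is slice? with step -1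
-- (defined for every list, so .getD [] loses nothing), extend of a filtered generator is ++ filter.
def gen_serpentine_alt (grid : List (List Int)) (nrows : Int) (width : Int) (reverse_start : Bool) : List Int :=
  let flip : Int := if reverse_start then 1 else 0
  (PySem.List.enumerate (PySem.List.slice grid none (some (max nrows 0))) 0).foldl
    (fun out p =>
      let seg := PySem.List.slice p.2 none (some (max width 0))
      let seg := if PySem.Int.mod (p.1 + flip) 2 != 0
                 then (PySem.List.slice? seg none none (-1)).getD []
                 else seg
      out ++ seg.filter (fun v => decide (0 ≤ v))) []

-- ===== PRECONDITION & SPEC =====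
-- Pre_ excludes exactly the inputs where the Python A raises IndexError:
-- some visited cell grid[r][c] (0 ≤ r < nrows, 0 ≤ c < width) does not exist.
def Pre_gen_serpentine (grid : List (List Int)) (nrows : Int) (width : Int) (reverse_start : Bool) : Prop :=
  nrows ≤ 0 ∨ width ≤ 0 ∨
    (nrows ≤ (grid.length : Int) ∧ ∀ row ∈ grid.take nrows.toNat, width ≤ (row.length : Int))
instance (grid : List (List Int)) (nrows : Int) (width : Int) (reverse_start : Bool) : Decidable (Pre_gen_serpentine grid nrows width reverse_start) := by unfold Pre_gen_serpentine; infer_instance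

def pvWitness_gen_serpentine : List (List Int) × Int × Int × Bool := ([[0, 1], [2, -1]], 2, 2, false)

def Spec_gen_serpentine (grid : List (List Int)) (nrows : Int) (width : Int) (reverse_start : Bool) (out : List Int) : Prop := out = gen_serpentine_alt grid nrows width reverse_start
instance (grid : List (List Int)) (nrows : Int) (width : Int) (reverse_start : Bool) (out : List Int) : Decidable (Spec_gen_serpentine grid nrows width reverse_start out) := by unfold Spec_gen_serpentine; infer_instance

-- ===== CLAIM (what is proved, stated in full; the proofs are below) =====
def Claim_equal_gen_serpentine : Prop := ∀ (grid : List (List Int)) (nrows : Int) (width : Int) (reverse_start : Bool), Dom_gen_serpentine grid nrows width reverse_start → Pre_gen_serpentine grid nrows width reverse_start → Spec_gen_serpentine grid nrows width reverse_start (gen_serpentine grid nrows width reverse_start)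
-- ===== LEMMAS AND PROOFS =====

-- the segment a row r contributes, shared target of both ports
def segOf (width flip r : Int) (row : List Int) : List Int :=
  (if PySem.Int.mod (r + flip) 2 != 0 then (row.take (max width 0).toNat).reverse
   else row.take (max width 0).toNat).filter (fun v => decide (0 ≤ v))

def canonical (grid : List (List Int)) (nrows width flip : Int) : List Int :=
  (PySem.List.pyRange 0 nrows 1).foldl
    (fun out r => out ++ segOf width flip r (PySem.List.pyGetD grid r [])) []

-- A's row-parity condition vs B's: the reversed row test is the negation of A's forward test.
theorem parity_eq (rs : Bool) (r : Int) :
    (PySem.Int.mod (r + (if rs then 1 else 0)) 2 != 0)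
      = !(PySem.Int.mod r 2 == (if rs then 1 else 0)) := by
  cases rs <;> simp <;> rw [Bool.eq_iff_iff] <;> simp <;> omega

theorem even_cond_eq (rs : Bool) (r : Int) :
    (if !rs then PySem.Int.mod r 2 == 0 else PySem.Int.mod r 2 == 1)
      = (PySem.Int.mod r 2 == (if rs then 1 else 0)) := by
  cases rs <;> simp

-- The column list a row r of A visits.
def colsOf (rs : Bool) (width r : Int) : List Int :=
  if PySem.Int.mod r 2 == (if rs then 1 else 0) then PySem.List.pyRange 0 width 1
  else PySem.List.pyRange (width - 1) (-1) (-1)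

-- A's order accumulator is the flatMap of per-row coordinate lists.
theorem order_eq (rs : Bool) (width : Int) (rows : List Int) (o : List (Int × Int)) :
    rows.foldl (fun order r =>
      let even := if !rs then PySem.Int.mod r 2 == 0 else PySem.Int.mod r 2 == 1
      if even then
        (PySem.List.pyRange 0 width 1).foldl (fun o c => o ++ [(r, c)]) order
      else
        (PySem.List.pyRange (width - 1) (-1) (-1)).foldl (fun o c => o ++ [(r, c)]) order) o
    = o ++ rows.flatMap (fun r => (colsOf rs width r).map (fun c => (r, c))) := by
  induction rows generalizing o with
  | nil => simp
  | cons r rows ih =>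
    simp only [List.foldl_cons, List.flatMap_cons, ← List.append_assoc]
    rw [ih]
    congr 1
    simp only [even_cond_eq]
    unfold colsOf
    rcases eq_or_ne ((r % 2 : Int)) (if rs then (1 : Int) else 0) with hm | hm <;>
      simp [hm] <;> rw [← List.flatMap_def] <;> exact Eq.symm List.map_eq_flatMap

theorem mem_colsOf {rs : Bool} {width r c : Int} (h : c ∈ colsOf rs width r) :
    0 ≤ c ∧ c < width := by
  unfold colsOf at h
  by_cases hm : (PySem.Int.mod r 2 == (if rs then 1 else 0)) = true
  · rw [if_pos hm, PySem.List.mem_pyRange_one] at h; omega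
  · rw [if_neg hm, PySem.List.mem_pyRange_neg_one] at h; omega

-- read_order_to_perm's fold over the flatMap regroups into a per-row double fold.
theorem fold_flatMap_eq (grid : List (List Int)) (nrows width : Int) (rs : Bool)
    (rows : List Int) (hrows : ∀ r ∈ rows, 0 ≤ r ∧ r < nrows) (acc : List Int) :
    (rows.flatMap (fun r => (colsOf rs width r).map (fun c => (r, c)))).foldl
      (fun perm rc =>
        if 0 ≤ rc.1 ∧ rc.1 < nrows ∧ 0 ≤ rc.2 ∧ rc.2 < width then
          let val := PySem.List.pyGetD (PySem.List.pyGetD grid rc.1 []) rc.2 0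
          if 0 ≤ val then perm ++ [val] else perm
        else perm) acc
    = rows.foldl (fun perm r =>
        (colsOf rs width r).foldl (fun perm c =>
          let v := PySem.List.pyGetD (PySem.List.pyGetD grid r []) c 0
          if 0 ≤ v then perm ++ [v] else perm) perm) acc := by
  induction rows generalizing acc with
  | nil => simp
  | cons r rows ih =>
    obtain ⟨hr0, hr1⟩ := hrows r (List.mem_cons_self ..)
    simp only [List.flatMap_cons, List.foldl_append, List.foldl_cons, List.foldl_map]
    rw [ih (fun x hx => hrows x (List.mem_cons_of_mem _ hx))]
    congr 1
    apply PySem.List.foldl_congr_mem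
    intro perm c hc
    have hcb := mem_colsOf hc
    simp only [hr0, hr1, hcb.1, hcb.2, and_self, if_true]

-- the forward column sweep reads exactly the row's prefix
theorem map_forward (row : List Int) (width : Int) (h : width ≤ 0 ∨ width ≤ (row.length : Int)) :
    (PySem.List.pyRange 0 width 1).map (fun c => PySem.List.pyGetD row c 0)
      = row.take (max width 0).toNat := by
  by_cases h0 : width ≤ 0
  · rw [PySem.List.pyRange_one_eq_nil h0]
    have : (max width 0).toNat = 0 := by omega
    simp [this]
  · have hw : width ≤ (row.length : Int) := by rcases h with h | h; omega; exact h
    have hmax : max width 0 = width := by omega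
    have hlen : (row.take width.toNat).length = width.toNat := by
      simp; omega
    have base := PySem.List.map_pyGetD_pyRange_zero (row.take width.toNat) (0 : Int)
    have hlen2 : PySem.List.len (row.take width.toNat) = width := by
      simp; omega
    rw [hlen2] at base
    rw [hmax, ← base]
    apply List.map_congr_left
    intro c hc
    rw [PySem.List.mem_pyRange_one] at hc
    rw [PySem.List.pyGetD_of_nonneg _ _ hc.1, PySem.List.pyGetD_of_nonneg _ _ hc.1]
    have hclt : c.toNat < width.toNat := by omega
    simp [List.getD, hclt]

-- per-row: A's column fold produces segOf
theorem row_fold_eq (grid : List (List Int)) (width : Int) (rs : Bool) (r : Int) (perm : List Int)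
    (h : width ≤ 0 ∨ width ≤ ((PySem.List.pyGetD grid r []).length : Int)) :
    (colsOf rs width r).foldl (fun perm c =>
        let v := PySem.List.pyGetD (PySem.List.pyGetD grid r []) c 0
        if 0 ≤ v then perm ++ [v] else perm) perm
      = perm ++ segOf width (if rs then 1 else 0) r (PySem.List.pyGetD grid r []) := by
  set row := PySem.List.pyGetD grid r [] with hrow
  have hfold : ∀ (cs : List Int) (acc : List Int),
      cs.foldl (fun perm c =>
        let v := PySem.List.pyGetD row c 0
        if 0 ≤ v then perm ++ [v] else perm) acc
      = acc ++ (cs.map (fun c => PySem.List.pyGetD row c 0)).filter (fun v => decide (0 ≤ v)) := by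
    intro cs acc
    rw [PySem.List.foldl_append_ite (fun c => 0 ≤ PySem.List.pyGetD row c 0)
      (fun c => PySem.List.pyGetD row c 0) cs acc, List.filter_map]
    rfl
  unfold colsOf segOf
  rw [parity_eq rs r]
  by_cases hm : (PySem.Int.mod r 2 == (if rs then 1 else 0)) = true
  · rw [if_pos hm, hfold, map_forward row width h, hm]
    simp
  · rw [if_neg hm, hfold]
    have hrw : PySem.List.pyRange (width - 1) (-1) (-1)
        = (PySem.List.pyRange 0 width 1).reverse := by
      have := PySem.List.pyRange_neg_one_eq_reverse (width - 1) (-1)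
      simpa using this
    rw [hrw, List.map_reverse, map_forward row width h]
    simp at hm
    simp [hm]

-- A = canonical under Pre_'s per-row bound
theorem a_eq_canonical (grid : List (List Int)) (nrows width : Int) (rs : Bool)
    (h : ∀ r : Int, 0 ≤ r → r < nrows →
      width ≤ 0 ∨ width ≤ ((PySem.List.pyGetD grid r []).length : Int)) :
    gen_serpentine grid nrows width rs = canonical grid nrows width (if rs then 1 else 0) := by
  simp only [gen_serpentine, read_order_to_perm, canonical]
  rw [order_eq, List.nil_append,
    fold_flatMap_eq grid nrows width rs _
      (fun r hr => by simpa [PySem.List.mem_pyRange_one] using hr)]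
  apply PySem.List.foldl_congr_mem
  intro perm r hr
  rw [PySem.List.mem_pyRange_one] at hr
  exact row_fold_eq grid width rs r perm (h r hr.1 hr.2)

-- B = canonical when 0 ≤ nrows ≤ len(grid)
theorem b_eq_canonical (grid : List (List Int)) (nrows width : Int) (rs : Bool)
    (h0 : 0 ≤ nrows) (h1 : nrows ≤ (grid.length : Int)) :
    gen_serpentine_alt grid nrows width rs = canonical grid nrows width (if rs then 1 else 0) := by
  simp only [gen_serpentine_alt, canonical]
  have hmax : max nrows 0 = nrows := by omega
  rw [hmax, PySem.List.slice_to grid h0,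
    PySem.List.enumerate_eq_map_pyRange _ ([] : List Int)]
  have hlen : PySem.List.len (grid.take nrows.toNat) = nrows := by
    simp; omega
  rw [hlen, List.foldl_map]
  apply PySem.List.foldl_congr_mem
  intro out r hr
  rw [PySem.List.mem_pyRange_one] at hr
  have hget : PySem.List.pyGetD (grid.take nrows.toNat) r [] = PySem.List.pyGetD grid r [] := by
    rw [PySem.List.pyGetD_of_nonneg _ _ hr.1, PySem.List.pyGetD_of_nonneg _ _ hr.1]
    have hlt : r.toNat < nrows.toNat := by omega
    simp [List.getD, hlt]
  simp only [hget]
  congr 1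
  unfold segOf
  rw [PySem.List.slice_to _ (by omega : (0:Int) ≤ max width 0),
    PySem.List.slice?_none_none_neg_one, Option.getD_some]

-- width ≤ 0: B returns [] outright (every segment is empty)
theorem b_eq_nil_of_width_nonpos (grid : List (List Int)) (nrows width : Int) (rs : Bool)
    (hw : width ≤ 0) : gen_serpentine_alt grid nrows width rs = [] := by
  simp only [gen_serpentine_alt]
  have hmax : max width 0 = 0 := by omega
  generalize PySem.List.enumerate (PySem.List.slice grid none (some (max nrows 0))) 0 = l
  induction l with
  | nil => rfl
  | cons p l ih =>
    simp only [List.foldl_cons, hmax]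
    simpa [PySem.List.slice, PySem.List.slice?_none_none_neg_one] using ih

theorem ports_agree (grid : List (List Int)) (nrows width : Int) (rs : Bool)
    (hpre : Pre_gen_serpentine grid nrows width rs) :
    gen_serpentine grid nrows width rs = gen_serpentine_alt grid nrows width rs := by
  by_cases hn : nrows ≤ 0
  · -- nrows ≤ 0: both empty
    rw [a_eq_canonical grid nrows width rs (fun r hr0 hr1 => by omega)]
    have hc : canonical grid nrows width (if rs then 1 else 0) = [] := by
      unfold canonical; rw [PySem.List.pyRange_one_eq_nil hn]; rfl
    have hb : gen_serpentine_alt grid nrows width rs = [] := by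
      simp only [gen_serpentine_alt]
      have hm : max nrows 0 = 0 := by omega
      rw [hm, PySem.List.slice_to grid (le_refl (0 : Int))]
      simp
    rw [hc, hb]
  by_cases hw : width ≤ 0
  · -- width ≤ 0: both empty
    rw [a_eq_canonical grid nrows width rs (fun r _ _ => Or.inl hw),
      b_eq_nil_of_width_nonpos grid nrows width rs hw]
    unfold canonical
    generalize PySem.List.pyRange 0 nrows 1 = l
    induction l with
    | nil => rfl
    | cons r l ih =>
      simp only [List.foldl_cons, segOf]
      have hm0 : (max width 0).toNat = 0 := by omega
      simpa [hm0] using ih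
  · -- main case: nrows > 0, width > 0, so Pre_'s third disjunct holds
    obtain ⟨h1, h2⟩ : nrows ≤ (grid.length : Int) ∧
        ∀ row ∈ grid.take nrows.toNat, width ≤ ((row.length : Nat) : Int) := by
      rcases hpre with h | h | h
      · omega
      · omega
      · exact h
    rw [b_eq_canonical grid nrows width rs (by omega) h1]
    apply a_eq_canonical
    intro r hr0 hr1
    right
    have hrn : r.toNat < grid.length := by omega
    have hgr : PySem.List.pyGetD grid r [] = grid[r.toNat]'hrn := by
      rw [PySem.List.pyGetD_of_nonneg _ _ hr0]
      simp [List.getD, List.getElem?_eq_getElem hrn]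
    have htk : r.toNat < (grid.take nrows.toNat).length := by simp; omega
    have heq : (grid.take nrows.toNat)[r.toNat]'htk = grid[r.toNat]'hrn := by
      simp [List.getElem_take]
    have hmem : grid[r.toNat]'hrn ∈ grid.take nrows.toNat :=
      heq ▸ (grid.take nrows.toNat).getElem_mem htk
    rw [hgr]
    exact h2 _ hmem

-- ===== VERDICT (by name: the statement is the Claim_ definition above) =====
theorem gen_serpentine_spec : Claim_equal_gen_serpentine := by
  intro grid nrows width rs _ hpre
  unfold Spec_gen_serpentine
  exact ports_agree grid nrows width rs hpre
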